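-- pv_equiv track=rewrite | github.com/johny-b/arc-oocr | functions.py | consecutive_to_last
-- ===== SOURCE A (Python) =====
-- def consecutive_to_last(lst: list) -> list:
--     if len(lst) <= 1:
--         return lst
--
--     last_value = lst[-1]
--     result = []
--     count = 1
--
--     for i in range(1, len(lst)):
--         if lst[i] == lst[i-1]:
--             count += 1
--         else:
--             if count > 1:
--                 result.extend([last_value] * count)
--             else:
--                 result.append(lst[i-1])
--             count = 1
--
--     if count > 1:
--         result.extend([last_value] * count)
--     else:
--         result.append(lst[-1])
--
--     return result
-- ===== SOURCE B (Python) =====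
-- def consecutive_to_last(lst: list) -> list:
--     if len(lst) <= 1:
--         return lst
--     last = lst[-1]
--     out = []
--     prev = None
--     for x, nxt in zip(lst, lst[1:] + [None]):
--         out.append(last if (prev == x or nxt == x) else x)
--         prev = x
--     return out
-- ===== Notes on version B (the rewrite author's own statement) =====
-- stated objective: simpler
-- what changed: Replaces the run-length counter with run flushes by a single stateless pass that replaces each element having an equal adjacent neighbor with the last element.
import Mathlib
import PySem

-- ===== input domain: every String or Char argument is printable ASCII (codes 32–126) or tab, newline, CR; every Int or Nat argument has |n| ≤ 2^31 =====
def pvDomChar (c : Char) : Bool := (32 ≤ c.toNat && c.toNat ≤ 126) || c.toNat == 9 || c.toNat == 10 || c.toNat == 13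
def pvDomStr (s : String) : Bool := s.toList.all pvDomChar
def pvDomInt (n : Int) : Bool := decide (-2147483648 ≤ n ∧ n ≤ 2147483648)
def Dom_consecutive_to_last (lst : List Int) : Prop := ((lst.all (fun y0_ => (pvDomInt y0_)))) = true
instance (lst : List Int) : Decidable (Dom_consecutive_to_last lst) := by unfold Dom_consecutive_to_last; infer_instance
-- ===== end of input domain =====

-- B replaces A's run-length counting and run flushes by a stateless one-pass
-- neighbor test (objective: simpler); return values agree on all inputs.

-- ===== PORT A =====
-- loop body of A's for-loop: state (result, count), arguments lst[i-1], lst[i]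
def pvStepA (last_value : Int) (st : List Int × Nat) (u v : Int) : List Int × Nat :=
  if v == u then (st.1, st.2 + 1)
  else if st.2 > 1 then (st.1 ++ List.replicate st.2 last_value, 1)
  else (st.1 ++ [u], 1)

def consecutive_to_last (lst : List Int) : List Int :=
  if lst.length ≤ 1 then lst
  else
    let last_value := PySem.List.pyGetD lst (-1) 0
    let st := (PySem.List.pyRange 1 (lst.length : Int) 1).foldl
      (fun st i => pvStepA last_value st (PySem.List.pyGetD lst (i-1) 0) (PySem.List.pyGetD lst i 0))
      ([], 1)
    if st.2 > 1 then st.1 ++ List.replicate st.2 last_value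
    else st.1 ++ [PySem.List.pyGetD lst (-1) 0]

-- ===== PORT B =====
-- Python's heterogeneous list lst[1:] + [None] is modeled as List (Option Int);
-- 'prev == x' / 'nxt == x' become Option-level equality tests.
def consecutive_to_last_alt (lst : List Int) : List Int :=
  if lst.length ≤ 1 then lst
  else
    let last := PySem.List.pyGetD lst (-1) 0
    ((lst.zip ((lst.drop 1).map some ++ [none])).foldl
      (fun (st : List Int × Option Int) q =>
        (st.1 ++ [if st.2 == some q.1 || q.2 == some q.1 then last else q.1], some q.1))
      ([], none)).1

-- ===== PRECONDITION & SPEC =====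
def Spec_consecutive_to_last (lst : List Int) (out : List Int) : Prop := out = consecutive_to_last_alt lst
instance (lst : List Int) (out : List Int) : Decidable (Spec_consecutive_to_last lst out) := by unfold Spec_consecutive_to_last; infer_instance

-- ===== CLAIM (what is proved, stated in full; the proofs are below) =====
def Claim_equal_consecutive_to_last : Prop := ∀ (lst : List Int), Dom_consecutive_to_last lst → Spec_consecutive_to_last lst (consecutive_to_last lst)

-- ===== LEMMAS AND PROOFS =====

-- structural version of A's index loop: fold over adjacent pairs
def pvPairFold {σ : Type} (g : σ → Int → Int → σ) : σ → List Int → σ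
  | st, u :: v :: t => pvPairFold g (g st u v) (v :: t)
  | st, _ => st

-- structural version of B's zip loop
def pvAltGo (last : Int) : Option Int → List Int → List Int
  | _, [] => []
  | p, x :: rest => (if p == some x || rest.head? == some x then last else x) :: pvAltGo last (some x) rest

lemma pvShift (x : Int) (l : List Int) (k : Nat) :
    PySem.List.pyGetD (x :: l) ((k : Int) + 1) 0 = PySem.List.pyGetD l (k : Int) 0 := by
  have h : ((k : Int) + 1) = (((k + 1 : Nat) : Int)) := by push_cast; ring
  rw [h, PySem.List.pyGetD_natCast, PySem.List.pyGetD_natCast]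
  simp

lemma pvRangeFold {σ : Type} (g : σ → Int → Int → σ) :
    ∀ (xs : List Int) (init : σ),
    (PySem.List.pyRange 1 (xs.length : Int) 1).foldl
      (fun st i => g st (PySem.List.pyGetD xs (i-1) 0) (PySem.List.pyGetD xs i 0)) init
    = pvPairFold g init xs := by
  intro xs
  induction xs with
  | nil => intro init; simp [pvPairFold, PySem.List.pyRange_one_eq_nil]
  | cons u rest ih =>
    intro init
    match rest with
    | [] => simp [pvPairFold, PySem.List.pyRange_one_eq_nil]
    | v :: t =>
      rw [PySem.List.pyRange_one] at *
      have hlen : (((u :: v :: t).length : Int) - 1).toNat = t.length + 1 := by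
        simp
      rw [hlen, List.range_succ_eq_map]
      simp only [List.foldl_map, List.foldl_cons]
      have h0 : (PySem.List.pyGetD (u :: v :: t) ((1 : Int) + (0:Nat) - 1) 0) = u := by
        norm_num [PySem.List.pyGetD_zero_cons]
      have h1 : (PySem.List.pyGetD (u :: v :: t) ((1 : Int) + (0:Nat)) 0) = v := by
        have h2 : ((1 : Int) + (0:Nat)) = ((0:Nat) : Int) + 1 := by norm_num
        rw [h2, pvShift]
        norm_num [PySem.List.pyGetD_zero_cons]
      rw [h0, h1]
      have ih' := ih (g init u v)
      have hlen2 : (((v :: t).length : Int) - 1).toNat = t.length := by simp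
      rw [hlen2] at ih'
      rw [show pvPairFold g init (u :: v :: t) = pvPairFold g (g init u v) (v :: t) from rfl]
      rw [← ih']
      simp only [List.foldl_map]
      apply PySem.List.foldl_congr_mem
      intro st k hk
      have s1 : PySem.List.pyGetD (u :: v :: t) (1 + (k.succ : Int) - 1) 0
          = PySem.List.pyGetD (v :: t) (1 + (k : Int) - 1) 0 := by
        have h1 : (1 + (k.succ : Int) - 1) = ((k : Int)) + 1 := by push_cast; ring
        have h2 : (1 + (k : Int) - 1) = ((k : Int)) := by ring
        rw [h1, h2, pvShift]
      have s2 : PySem.List.pyGetD (u :: v :: t) (1 + (k.succ : Int)) 0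
          = PySem.List.pyGetD (v :: t) (1 + (k : Int)) 0 := by
        have h1 : (1 + (k.succ : Int)) = (((k + 1 : Nat) : Int)) + 1 := by push_cast; ring
        have h2 : (1 + (k : Int)) = (((k + 1 : Nat) : Int)) := by push_cast; ring
        rw [h1, h2, pvShift]
      rw [s1, s2]

lemma pvMain (last : Int) :
    ∀ (rest : List Int) (prev : Int) (res : List Int) (cnt : Nat) (p : Option Int),
    1 ≤ cnt → ((p == some prev) = decide (1 < cnt)) →
    (if (pvPairFold (pvStepA last) (res, cnt) (prev :: rest)).2 > 1 then
        (pvPairFold (pvStepA last) (res, cnt) (prev :: rest)).1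
          ++ List.replicate (pvPairFold (pvStepA last) (res, cnt) (prev :: rest)).2 last
     else (pvPairFold (pvStepA last) (res, cnt) (prev :: rest)).1
          ++ [(prev :: rest).getLast (List.cons_ne_nil _ _)])
    = res ++ List.replicate (cnt - 1) last ++ pvAltGo last p (prev :: rest) := by
  intro rest
  induction rest with
  | nil =>
    intro prev res cnt p hcnt hp
    simp only [pvPairFold, pvAltGo, List.head?_nil]
    by_cases h : 1 < cnt
    · have hc1 : (if (res, cnt).2 > 1 then (res, cnt).1 ++ List.replicate (res, cnt).2 last
          else (res, cnt).1 ++ [[prev].getLast (by simp)]) = res ++ List.replicate cnt last := by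
        simp [h]
      rw [hc1]
      have hb : (p == some prev || (none : Option Int) == some prev) = true := by
        simp [hp, h]
      have hrep : List.replicate (cnt - 1) last ++ [last] = List.replicate cnt last := by
        rw [← List.replicate_succ' (n := cnt - 1)]
        congr 1
        omega
      simp only [hb, if_true]
      rw [List.append_assoc, hrep]
    · have hc : cnt = 1 := by omega
      subst hc
      have hpf : ¬ p = some prev := by simpa using hp
      simp [List.getLast, hpf]
  | cons x rest' ih =>
    intro prev res cnt p hcnt hp
    rw [show pvPairFold (pvStepA last) (res, cnt) (prev :: x :: rest')
        = pvPairFold (pvStepA last) (pvStepA last (res, cnt) prev x) (x :: rest') from rfl]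
    by_cases hx : x = prev
    · subst hx
      have hstep : pvStepA last (res, cnt) x x = (res, cnt + 1) := by
        simp [pvStepA]
      rw [hstep]
      have ihh := ih x res (cnt + 1) (some x) (by omega)
        (by have h1 : 1 < cnt + 1 := by omega
            simp [h1])
      have hgl : (x :: x :: rest').getLast (List.cons_ne_nil _ _)
          = (x :: rest').getLast (List.cons_ne_nil _ _) := List.getLast_cons _
      rw [hgl, ihh]
      have hhd : (p == some x || (x :: rest').head? == some x) = true := by
        simp
      simp only [pvAltGo, hhd]
      have : List.replicate (cnt + 1 - 1) last = List.replicate (cnt - 1) last ++ [last] := by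
        rw [← List.replicate_succ' (n := cnt - 1)]
        congr 1
        omega
      rw [this]
      simp
    · have hbe : (x == prev) = false := by simp [hx]
      have hstep : pvStepA last (res, cnt) prev x
          = (res ++ (if cnt > 1 then List.replicate cnt last else [prev]), 1) := by
        by_cases h1 : 1 < cnt
        · simp [pvStepA, hbe, h1]
        · have : cnt = 1 := by omega
          subst this
          simp [pvStepA, hbe]
      rw [hstep]
      have ihh := ih x (res ++ (if cnt > 1 then List.replicate cnt last else [prev])) 1 (some prev)
        (by omega)
        (by have : ¬ prev = x := fun h => hx h.symm
            simpa using this)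
      have hgl : (prev :: x :: rest').getLast (List.cons_ne_nil _ _)
          = (x :: rest').getLast (List.cons_ne_nil _ _) := List.getLast_cons _
      rw [hgl, ihh]
      have hhd : ((x :: rest').head? == some prev) = false := by
        simp [hx]
      by_cases h1 : 1 < cnt
      · have hp' : (p == some prev) = true := by rw [hp]; simp [h1]
        simp only [pvAltGo, List.head?_cons, hp', Bool.true_or]
        have : List.replicate (cnt - 1) last ++ [last] = List.replicate cnt last := by
          rw [← List.replicate_succ' (n := cnt - 1)]
          congr 1
          omega
        simp [h1, ← this]
      · have hc : cnt = 1 := by omega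
        subst hc
        have hp' : (p == some prev) = false := by rw [hp]; simp
        simp [pvAltGo, hp', hx]

lemma pvBfold (last : Int) :
    ∀ (xs : List Int) (out : List Int) (p : Option Int),
    ((xs.zip ((xs.drop 1).map some ++ [none])).foldl
      (fun (st : List Int × Option Int) q =>
        (st.1 ++ [if st.2 == some q.1 || q.2 == some q.1 then last else q.1], some q.1))
      (out, p)).1
    = out ++ pvAltGo last p xs := by
  intro xs
  induction xs with
  | nil => intro out p; simp [pvAltGo]
  | cons x rest ih =>
    intro out p
    match rest with
    | [] =>
      simp [pvAltGo]
    | y :: t =>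
      rw [show ((x :: y :: t).drop 1).map some ++ [none] = some y :: ((y :: t).drop 1).map some ++ [none] from rfl]
      rw [show (x :: y :: t).zip (some y :: ((y :: t).drop 1).map some ++ [none])
          = (x, some y) :: (y :: t).zip (((y :: t).drop 1).map some ++ [none]) from rfl]
      rw [List.foldl_cons, ih]
      simp [pvAltGo]

-- ===== VERDICT (by name: the statement is the Claim_ definition above) =====
theorem consecutive_to_last_spec : Claim_equal_consecutive_to_last := by
  unfold Claim_equal_consecutive_to_last Spec_consecutive_to_last
  intro lst _
  match lst with
  | [] => simp [consecutive_to_last, consecutive_to_last_alt]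
  | [x] => simp [consecutive_to_last, consecutive_to_last_alt]
  | u :: v :: t =>
    have hlen : ¬ (u :: v :: t).length ≤ 1 := by simp
    have hne : (u :: v :: t) ≠ [] := List.cons_ne_nil _ _
    have hlast : PySem.List.pyGetD (u :: v :: t) (-1) 0 = (u :: v :: t).getLast hne :=
      PySem.List.pyGetD_neg_one (u :: v :: t) 0 hne
    rw [consecutive_to_last, consecutive_to_last_alt]
    simp only [if_neg hlen]
    rw [hlast]
    rw [pvRangeFold (pvStepA ((u :: v :: t).getLast hne)) (u :: v :: t) ([], 1)]
    rw [pvBfold ((u :: v :: t).getLast hne) (u :: v :: t) [] none]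
    rw [pvMain ((u :: v :: t).getLast hne) (v :: t) u [] 1 none (by omega) (by simp)]
    simp
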